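-- pv_equiv track=rewrite | github.com/Noble777/Minesweeper-with-AI | logic_inference.py | pl_true_int_repr
-- ===== SOURCE A (Python) =====
-- def pl_true_int_repr(clause, model={}):
--     result = False
--     for lit in clause:
--         if lit < 0:
--             p = model.get(-lit)
--             if p is not None:
--                 p = not p
--         else:
--             p = model.get(lit)
--         if p is True:
--             return True
--         elif p is None:
--             result = None
--     return result
-- ===== SOURCE B (Python) =====
-- def pl_true_int_repr(clause, model={}):
--     sat = {v for v, b in model.items() if b and v >= 0} | {-v for v, b in model.items() if not b and v > 0}
--     assigned = set(model)
--     if any(l in sat for l in clause):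
--         return True
--     if all(abs(l) in assigned for l in clause):
--         return False
--     return None
-- ===== Notes on version B (the rewrite author's own statement) =====
-- stated objective: alternative
-- what changed: Instead of looking each literal up in the model one by one, B inverts the direction: it indexes the model once into a set of satisfied literals (true variables and negations of false ones) and a set of assigned variables, then answers purely by set membership over the clause.
import Mathlib
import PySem

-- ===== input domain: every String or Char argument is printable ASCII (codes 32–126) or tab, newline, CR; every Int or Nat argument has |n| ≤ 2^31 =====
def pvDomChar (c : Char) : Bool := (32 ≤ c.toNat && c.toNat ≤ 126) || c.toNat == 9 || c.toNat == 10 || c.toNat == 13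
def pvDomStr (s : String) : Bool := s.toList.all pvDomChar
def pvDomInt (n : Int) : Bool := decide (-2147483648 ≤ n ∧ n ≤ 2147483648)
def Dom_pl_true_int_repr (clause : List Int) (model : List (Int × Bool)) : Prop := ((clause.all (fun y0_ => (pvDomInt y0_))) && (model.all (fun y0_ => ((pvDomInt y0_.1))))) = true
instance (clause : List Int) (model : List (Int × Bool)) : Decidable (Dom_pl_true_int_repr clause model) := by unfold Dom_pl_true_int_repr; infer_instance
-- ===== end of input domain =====

-- B inverts the computation: instead of looking each literal up in the model, it indexes the
-- model once into a set of satisfied literals and a set of assigned variables, then answers by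
-- set membership; same return value, no speed claim ('alternative').


-- ===== PORT A =====
-- Python `model.get(k)` on the association-list model (first match)
def pvModelGet (model : List (Int × Bool)) (k : Int) : Option Bool :=
  (model.find? (fun kv => kv.1 == k)).map (·.2)

def plTrueGoA (model : List (Int × Bool)) : List Int → Option Bool → Option Bool
  | [], result => result
  | lit :: rest, result =>
    let p : Option Bool :=
      if lit < 0 then (pvModelGet model (-lit)).map (fun b => !b)
      else pvModelGet model lit
    if p = some true then some true
    else if p = none then plTrueGoA model rest none
    else plTrueGoA model rest result

def pl_true_int_repr (clause : List Int) (model : List (Int × Bool)) : Option Bool :=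
  plTrueGoA model clause (some false)

-- ===== PORT B =====
-- the items of the dict the association list represents (first occurrence of each key wins,
-- matching the first-match lookup convention); Python iterates `model.items()` directly
def pvEffItems : List (Int × Bool) → List (Int × Bool)
  | [] => []
  | kv :: rest => kv :: (pvEffItems rest).filter (fun p => !(p.1 == kv.1))

def pl_true_int_repr_alt (clause : List Int) (model : List (Int × Bool)) : Option Bool :=
  let items := pvEffItems model
  -- {v for v, b in model.items() if b and v >= 0} | {-v for v, b in model.items() if not b and v > 0}
  let sat : PySem.Set Int :=
    PySem.Set.union
      (PySem.Set.ofList ((items.filter (fun p => p.2 && decide (0 ≤ p.1))).map (·.1)))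
      ((items.filter (fun p => !p.2 && decide (0 < p.1))).map (fun p => -p.1))
  -- assigned = set(model)
  let assigned : PySem.Set Int := PySem.Set.ofList (items.map (·.1))
  if clause.any (fun l => sat.contains l) then some true
  else if clause.all (fun l => assigned.contains |l|) then some false
  else none

-- ===== PRECONDITION & SPEC =====
def Spec_pl_true_int_repr (clause : List Int) (model : List (Int × Bool)) (out : Option Bool) : Prop := out = pl_true_int_repr_alt clause model
instance (clause : List Int) (model : List (Int × Bool)) (out : Option Bool) : Decidable (Spec_pl_true_int_repr clause model out) := by unfold Spec_pl_true_int_repr; infer_instance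

-- ===== CLAIM (what is proved, stated in full; the proofs are below) =====
def Claim_equal_pl_true_int_repr : Prop := ∀ (clause : List Int) (model : List (Int × Bool)), Dom_pl_true_int_repr clause model → Spec_pl_true_int_repr clause model (pl_true_int_repr clause model)

-- ===== LEMMAS AND PROOFS =====

-- the value A computes for one literal
def pvLitValue (model : List (Int × Bool)) (lit : Int) : Option Bool :=
  if lit < 0 then (pvModelGet model (-lit)).map (fun b => !b) else pvModelGet model lit

-- membership in the dedupped items is first-match lookup
lemma mem_eff_iff (m : List (Int × Bool)) (k : Int) (v : Bool) :
    (k, v) ∈ pvEffItems m ↔ m.find? (fun p => p.1 == k) = some (k, v) := by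
  induction m with
  | nil => simp [pvEffItems]
  | cons kv rest ih =>
    obtain ⟨a, b⟩ := kv
    simp only [pvEffItems, List.mem_cons, List.mem_filter, List.find?_cons]
    by_cases h : a = k
    · subst h
      simp [Prod.ext_iff, and_comm, eq_comm]
    · have : (a == k) = false := by simp [h]
      simp [this, ih, Ne.symm h, Prod.ext_iff]

lemma mem_keys_eff_iff (m : List (Int × Bool)) (k : Int) :
    k ∈ (pvEffItems m).map (·.1) ↔ (m.find? (fun p => p.1 == k)).isSome := by
  constructor
  · intro h
    obtain ⟨⟨a, b⟩, hmem, hk⟩ := List.mem_map.mp h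
    simp only at hk; subst hk
    rw [(mem_eff_iff m a b).mp hmem]; rfl
  · intro h
    obtain ⟨⟨a, b⟩, hfind⟩ := Option.isSome_iff_exists.mp h
    have ha : a = k := by
      have := List.find?_some hfind
      simpa using this
    subst ha
    exact List.mem_map.mpr ⟨(a, b), (mem_eff_iff m a b).mpr hfind, rfl⟩

-- find? at key k returns a pair whose key is k
lemma find?_key_eq (m : List (Int × Bool)) (k : Int) (q : Int × Bool)
    (h : m.find? (fun p => p.1 == k) = some q) : q.1 = k := by
  have := List.find?_some h
  simpa using this

-- literal is in B's `sat` set iff A's per-literal value is `some true`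
lemma mem_sat_iff (m : List (Int × Bool)) (lit : Int) :
    (lit ∈ PySem.Set.union
      (PySem.Set.ofList (((pvEffItems m).filter (fun p => p.2 && decide (0 ≤ p.1))).map (·.1)))
      (((pvEffItems m).filter (fun p => !p.2 && decide (0 < p.1))).map (fun p => -p.1)))
    ↔ pvLitValue m lit = some true := by
  rw [PySem.Set.mem_union, PySem.Set.mem_ofList]
  unfold pvLitValue pvModelGet
  constructor
  · rintro (h | h)
    · obtain ⟨⟨a, b⟩, hmem, hk⟩ := List.mem_map.mp h
      obtain ⟨hin, hcond⟩ := List.mem_filter.mp hmem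
      simp only [Bool.and_eq_true, decide_eq_true_eq] at hcond
      simp only at hk; subst hk
      have hfind := (mem_eff_iff m a b).mp hin
      have hnneg : ¬ a < 0 := by omega
      rw [if_neg hnneg, hfind, hcond.1]
      rfl
    · obtain ⟨⟨a, b⟩, hmem, hk⟩ := List.mem_map.mp h
      obtain ⟨hin, hcond⟩ := List.mem_filter.mp hmem
      simp only [Bool.and_eq_true, Bool.not_eq_true', decide_eq_true_eq] at hcond
      simp only at hk
      have hfind := (mem_eff_iff m a b).mp hin
      have hneg : (-a : Int) < 0 := by omega
      rw [← hk, if_pos hneg, neg_neg, hfind, hcond.1]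
      rfl
  · intro h
    by_cases hl : lit < 0
    · rw [if_pos hl] at h
      right
      rcases hfind : m.find? (fun p => p.1 == -lit) with _ | ⟨a, b⟩
      · rw [hfind] at h; simp at h
      · rw [hfind] at h
        have ha : a = -lit := find?_key_eq m (-lit) (a, b) hfind
        have hb : b = false := by
          simp only [Option.map_some, Option.some.injEq] at h
          cases b <;> simp_all
        subst ha hb
        refine List.mem_map.mpr ⟨(-lit, false), List.mem_filter.mpr ⟨(mem_eff_iff m (-lit) false).mpr hfind, ?_⟩, by simp⟩
        simp; omega
    · rw [if_neg hl] at h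
      left
      rcases hfind : m.find? (fun p => p.1 == lit) with _ | ⟨a, b⟩
      · rw [hfind] at h; simp at h
      · rw [hfind] at h
        have ha : a = lit := find?_key_eq m lit (a, b) hfind
        have hb : b = true := by
          simp only [Option.map_some, Option.some.injEq] at h
          exact h
        subst hb
        subst ha
        refine List.mem_map.mpr ⟨(a, true), List.mem_filter.mpr ⟨(mem_eff_iff m a true).mpr hfind, ?_⟩, rfl⟩
        simp; omega

-- |lit| is in B's `assigned` set iff A's per-literal value is not `none`
lemma mem_assigned_iff (m : List (Int × Bool)) (lit : Int) :
    (|lit| ∈ PySem.Set.ofList ((pvEffItems m).map (·.1))) ↔ pvLitValue m lit ≠ none := by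
  rw [PySem.Set.mem_ofList, mem_keys_eff_iff]
  unfold pvLitValue pvModelGet
  by_cases hl : lit < 0
  · have : |lit| = -lit := abs_of_neg hl
    rw [this, if_pos hl]
    cases m.find? (fun p => p.1 == -lit) <;> simp
  · have : |lit| = lit := abs_of_nonneg (by omega)
    rw [this, if_neg hl]
    cases m.find? (fun p => p.1 == lit) <;> simp

-- characterisation of A's loop for the two accumulator values it can carry
lemma goA_char (model : List (Int × Bool)) (clause : List Int) :
    ∀ r : Option Bool, r = some false ∨ r = none →
    plTrueGoA model clause r =
      if (clause.map (pvLitValue model)).any (fun v => v = some true) then some true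
      else if (clause.map (pvLitValue model)).any (fun v => v = none) then none
      else r := by
  induction clause with
  | nil => intro r _; simp [plTrueGoA]
  | cons lit rest ih =>
    intro r hr
    simp only [plTrueGoA, List.map_cons, List.any_cons]
    show (if pvLitValue model lit = some true then some true
          else if pvLitValue model lit = none then plTrueGoA model rest none
          else plTrueGoA model rest r) = _
    set v := pvLitValue model lit with hv
    rcases v with _ | b
    · rw [ih none (Or.inr rfl)]; simp [← hv]
    · cases b
      · rw [ih r hr]
        rcases hr with h | h <;> subst h <;> simp [← hv]
      · simp [← hv]

-- ===== VERDICT (by name: the statement is the Claim_ definition above) =====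
theorem pl_true_int_repr_spec : Claim_equal_pl_true_int_repr := by
  intro clause model _
  unfold Spec_pl_true_int_repr pl_true_int_repr
  rw [goA_char model clause (some false) (Or.inl rfl)]
  have halt : pl_true_int_repr_alt clause model =
      (if clause.any (fun l => List.contains
            (PySem.Set.union
              (PySem.Set.ofList (((pvEffItems model).filter (fun p => p.2 && decide (0 ≤ p.1))).map (·.1)))
              (((pvEffItems model).filter (fun p => !p.2 && decide (0 < p.1))).map (fun p => -p.1))) l)
        then some true
        else if clause.all (fun l => List.contains (PySem.Set.ofList ((pvEffItems model).map (·.1))) |l|)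
        then some false else none) := rfl
  have hsat : ∀ l : Int, (decide (pvLitValue model l = some true)) = List.contains
      (PySem.Set.union
        (PySem.Set.ofList (((pvEffItems model).filter (fun p => p.2 && decide (0 ≤ p.1))).map (·.1)))
        (((pvEffItems model).filter (fun p => !p.2 && decide (0 < p.1))).map (fun p => -p.1))) l := by
    intro l
    rw [Bool.eq_iff_iff, decide_eq_true_eq, List.contains_iff_mem]
    exact (mem_sat_iff model l).symm
  have hass : ∀ l : Int, (decide (pvLitValue model l = none)) =
      !(List.contains (PySem.Set.ofList ((pvEffItems model).map (·.1))) |l|) := by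
    intro l
    rw [Bool.eq_iff_iff, decide_eq_true_eq, Bool.not_eq_true', ← Bool.not_eq_true, List.contains_iff_mem]
    constructor
    · intro h hmem
      exact (mem_assigned_iff model l).mp hmem h
    · intro h
      by_contra hne
      exact h ((mem_assigned_iff model l).mpr hne)
  have e1 : ((clause.map (pvLitValue model)).any (fun v => v = some true)) =
      clause.any (fun l => List.contains
        (PySem.Set.union
          (PySem.Set.ofList (((pvEffItems model).filter (fun p => p.2 && decide (0 ≤ p.1))).map (·.1)))
          (((pvEffItems model).filter (fun p => !p.2 && decide (0 < p.1))).map (fun p => -p.1))) l) := by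
    rw [List.any_map]
    exact congrArg clause.any (funext fun l => hsat l)
  have e2 : ((clause.map (pvLitValue model)).any (fun v => v = none)) =
      !(clause.all (fun l => List.contains (PySem.Set.ofList ((pvEffItems model).map (·.1))) |l|)) := by
    rw [List.any_map]
    have : ((fun v : Option Bool => decide (v = none)) ∘ pvLitValue model) =
        fun l => !(List.contains (PySem.Set.ofList ((pvEffItems model).map (·.1))) |l|) :=
      funext fun l => hass l
    rw [this, List.any_eq_not_all_not]
    simp
  rw [halt, e1, e2]
  by_cases h1 : (clause.any (fun l => List.contains
      (PySem.Set.union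
        (PySem.Set.ofList (((pvEffItems model).filter (fun p => p.2 && decide (0 ≤ p.1))).map (·.1)))
        (((pvEffItems model).filter (fun p => !p.2 && decide (0 < p.1))).map (fun p => -p.1))) l)) = true
  · rw [if_pos h1, if_pos h1]
  · rw [if_neg h1, if_neg h1]
    cases h2 : clause.all (fun l => List.contains (PySem.Set.ofList ((pvEffItems model).map (·.1))) |l|) <;> rfl
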